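-- pv_equiv track=rewrite | github.com/nikhilrajpk/Data-structure-and-algorithms | String/replacing_alphabet.py | replace_alphabet
-- ===== SOURCE A (Python) =====
-- def replace_alphabet(string, key):
--     new_key = key % len(string)
--     s = ['']*len(string)
--     for i in range(len(string)):
--         pos = i + new_key
--         if pos < len(string):
--             s[i] = string[pos]
--         else:
--             s[i] = string[(pos%len(string))]
--     return ''.join(s)
-- ===== SOURCE B (Python) =====
-- def replace_alphabet(string, key):
--     new_key = key % len(string)
--     return string[new_key:] + string[:new_key]
-- ===== Notes on version B (the rewrite author's own statement) =====
-- stated objective: idiomatic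
-- what changed: Replaces the per-character indexed loop with a preallocated list and modular position lookup by a single slice-and-concatenate left rotation computed after the same modulo.
import Mathlib
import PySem

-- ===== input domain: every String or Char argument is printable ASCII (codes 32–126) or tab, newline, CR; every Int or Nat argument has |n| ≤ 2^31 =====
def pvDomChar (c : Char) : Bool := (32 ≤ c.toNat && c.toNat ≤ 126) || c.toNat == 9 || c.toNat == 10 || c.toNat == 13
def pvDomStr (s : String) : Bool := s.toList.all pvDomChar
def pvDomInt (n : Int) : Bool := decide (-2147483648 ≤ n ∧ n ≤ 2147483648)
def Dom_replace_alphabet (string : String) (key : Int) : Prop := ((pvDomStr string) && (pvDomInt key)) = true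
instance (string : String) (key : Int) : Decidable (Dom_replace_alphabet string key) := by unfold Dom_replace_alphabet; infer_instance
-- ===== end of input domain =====

-- B replaces A's per-index loop with modular lookup by one slice-and-concatenate rotation (idiomatic; same O(n) cost).

-- ===== PORT A =====
-- Literal port of A: new_key = key % len, then for each i pick string[i+new_key] or string[(i+new_key) % len].
-- (Python's 1-char-string assignments into a preallocated list joined by '' = building the char list directly;
--  indexing uses pyGetD with an arbitrary default — under Pre_ every index is provably in range.)
def replace_alphabet (string : String) (key : Int) : String :=
  let cs := string.toList
  let n : Int := cs.length
  let new_key := PySem.Int.mod key n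
  let s := (PySem.List.pyRange 0 n 1).map (fun i =>
    let pos := i + new_key
    if pos < n then PySem.List.pyGetD cs pos ' '
    else PySem.List.pyGetD cs (PySem.Int.mod pos n) ' ')
  String.ofList s

-- ===== PORT B =====
-- Literal port of B: new_key = key % len(string); return string[new_key:] + string[:new_key]
def replace_alphabet_alt (string : String) (key : Int) : String :=
  let cs := string.toList
  let n : Int := cs.length
  let new_key := PySem.Int.mod key n
  String.ofList (PySem.List.slice cs (some new_key) none ++ PySem.List.slice cs none (some new_key))

-- ===== PRECONDITION & SPEC =====
-- Pre_ excludes only the empty string, on which A (and B) raise ZeroDivisionError at 'key % len(string)'.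
def Pre_replace_alphabet (string : String) (key : Int) : Prop := string ≠ ""
instance (string : String) (key : Int) : Decidable (Pre_replace_alphabet string key) := by unfold Pre_replace_alphabet; infer_instance
def pvWitness_replace_alphabet : String × Int := ("abc", 5)
def Spec_replace_alphabet (string : String) (key : Int) (out : String) : Prop := out = replace_alphabet_alt string key
instance (string : String) (key : Int) (out : String) : Decidable (Spec_replace_alphabet string key out) := by unfold Spec_replace_alphabet; infer_instance

-- ===== CLAIM (what is proved, stated in full; the proofs are below) =====
def Claim_equal_replace_alphabet : Prop := ∀ (string : String) (key : Int), Dom_replace_alphabet string key → Pre_replace_alphabet string key → Spec_replace_alphabet string key (replace_alphabet string key)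

-- ===== LEMMAS AND PROOFS =====

-- Core fact: the index-by-index rotation equals drop ++ take, proved elementwise.
theorem pv_rotate_core (cs : List Char) (k : Int) (h0 : 0 < cs.length)
    (hk0 : 0 ≤ k) (hkn : k < (cs.length : Int)) :
    (PySem.List.pyRange 0 (cs.length : Int) 1).map (fun i =>
      if i + k < (cs.length : Int) then PySem.List.pyGetD cs (i + k) ' '
      else PySem.List.pyGetD cs (PySem.Int.mod (i + k) (cs.length : Int)) ' ')
    = cs.drop k.toNat ++ cs.take k.toNat := by
  have hkt : ((k.toNat : Int)) = k := Int.toNat_of_nonneg hk0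
  apply List.ext_getElem
  · simp [PySem.List.length_pyRange_one]
    omega
  · intro i hi hi'
    have hiN : i < cs.length := by
      simp [PySem.List.length_pyRange_one] at hi
      omega
    rw [List.getElem_map, PySem.List.getElem_pyRange_one]
    by_cases hc : (0 : Int) + i + k < (cs.length : Int)
    · rw [if_pos hc, PySem.List.pyGetD_eq_getElem cs ' ' (by omega) hc]
      rw [List.getElem_append_left (by simp; omega)]
      rw [List.getElem_drop]
      congr 1
      omega
    · rw [if_neg hc]
      have hmod : PySem.Int.mod ((0:Int) + i + k) (cs.length : Int) = (0:Int) + i + k - cs.length := by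
        have heq := PySem.Int.floordiv_mul_add_mod ((0:Int) + i + k) (cs.length : Int)
        have hq : PySem.Int.floordiv ((0:Int) + i + k) (cs.length : Int) = 1 := by
          rw [PySem.Int.floordiv_eq_iff_of_pos (by exact_mod_cast h0)]
          constructor <;> omega
        rw [hq] at heq
        omega
      rw [hmod, PySem.List.pyGetD_eq_getElem cs ' ' (by omega) (by omega)]
      rw [List.getElem_append_right (by simp; omega)]
      rw [List.getElem_take]
      congr 1
      simp
      omega

-- ===== VERDICT (by name: the statement is the Claim_ definition above) =====
theorem replace_alphabet_spec : Claim_equal_replace_alphabet := by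
  intro string key _ hpre
  have h0 : 0 < string.toList.length := by
    cases hs : string.toList with
    | nil => exact absurd (by
        have : string = "" := by
          cases string with | _ d => simp at hs; simp [hs]
        exact this) hpre
    | cons a l => simp
  have hpos : (0 : Int) < (string.toList.length : Int) := by exact_mod_cast h0
  have hk0 := PySem.Int.mod_nonneg key hpos
  have hkn := PySem.Int.mod_lt key hpos
  simp only [Spec_replace_alphabet, replace_alphabet, replace_alphabet_alt]
  rw [PySem.List.slice_from _ hk0, PySem.List.slice_to _ hk0]
  exact congrArg String.ofList (pv_rotate_core string.toList _ h0 hk0 hkn)
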